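-- pv_equiv track=rewrite | github.com/ozyildiz/tex-to-html | theCleaner.py | noPreamble
-- ===== SOURCE A (Python) =====
-- def noPreamble(liste):
--     tempList = []
--     beg = 0
--     end = 0
--     for i in range(len(liste)):
--         if "maketitle" in liste[i]:
--             beg = i
--         elif "end{document}" in liste[i]:
--             end = i
--     tempList = liste[beg+1:end]
--     return(tempList)
-- ===== SOURCE B (Python) =====
-- def noPreamble(liste):
--     beg = 0
--     for i in range(len(liste) - 1, -1, -1):
--         if "maketitle" in liste[i]:
--             beg = i
--             break
--     end = 0
--     for i in range(len(liste) - 1, -1, -1):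
--         if "end{document}" in liste[i]:
--             end = i
--             break
--     return liste[beg + 1:end]
-- ===== Notes on version B (the rewrite author's own statement) =====
-- stated objective: alternative
-- what changed: Replaces A's single forward loop that carries both boundary indices with two independent backward scans that break at the first (i.e. last) matching line; A's elif needs no mirroring because a line containing both markers also advances beg past it, so both slices are empty there.
import Mathlib
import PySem

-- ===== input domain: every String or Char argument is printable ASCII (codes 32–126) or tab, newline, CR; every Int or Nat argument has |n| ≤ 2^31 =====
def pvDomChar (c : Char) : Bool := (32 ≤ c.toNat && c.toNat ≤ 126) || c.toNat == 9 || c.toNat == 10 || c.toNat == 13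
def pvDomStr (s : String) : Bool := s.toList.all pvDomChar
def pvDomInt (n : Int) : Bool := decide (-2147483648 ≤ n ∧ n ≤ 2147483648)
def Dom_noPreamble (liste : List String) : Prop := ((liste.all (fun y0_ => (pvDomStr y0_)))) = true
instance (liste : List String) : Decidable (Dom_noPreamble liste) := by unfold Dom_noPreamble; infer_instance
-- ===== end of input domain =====

-- B replaces A's single forward loop carrying both boundary indices with two independent
-- backward scans that break at the first (i.e. last) matching line (alternative, not faster).

-- ===== PORT A =====
-- one forward loop over range(len(liste)) updating (beg, end); then liste[beg+1:end]
def noPreamble (liste : List String) : List String :=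
  let st := (PySem.List.pyRange 0 (liste.length : Int) 1).foldl
    (fun (be : Int × Int) i =>
      if PySem.Str.isIn "maketitle" (PySem.List.pyGetD liste i "") then (i, be.2)
      else if PySem.Str.isIn "end{document}" (PySem.List.pyGetD liste i "") then (be.1, i)
      else be) (0, 0)
  PySem.List.slice liste (some (st.1 + 1)) (some st.2)

-- ===== PORT B =====
-- backward scan with break = first match in the reversed enumeration, default 0
def pvLastIdx (p : String → Bool) : List (Int × String) → Int
  | [] => 0
  | (i, s) :: rest => if p s then i else pvLastIdx p rest

def noPreamble_alt (liste : List String) : List String :=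
  let rev := (PySem.List.enumerate liste 0).reverse
  let beg := pvLastIdx (fun s => PySem.Str.isIn "maketitle" s) rev
  let e := pvLastIdx (fun s => PySem.Str.isIn "end{document}" s) rev
  PySem.List.slice liste (some (beg + 1)) (some e)

-- ===== PRECONDITION & SPEC =====
def Spec_noPreamble (liste : List String) (out : List String) : Prop := out = noPreamble_alt liste
instance (liste : List String) (out : List String) : Decidable (Spec_noPreamble liste out) := by unfold Spec_noPreamble; infer_instance

-- ===== CLAIM (what is proved, stated in full; the proofs are below) =====
def Claim_equal_noPreamble : Prop := ∀ (liste : List String), Dom_noPreamble liste → Spec_noPreamble liste (noPreamble liste)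

-- ===== LEMMAS AND PROOFS =====

-- A's fold over the enumeration computes B's backward first-match for "maketitle"
-- and the backward first-match for "end{document}"-but-not-"maketitle" (the elif)
theorem fold_eq_lastIdx (l : List (Int × String)) :
    l.foldl (fun (be : Int × Int) (p : Int × String) =>
      if PySem.Str.isIn "maketitle" p.2 then (p.1, be.2)
      else if PySem.Str.isIn "end{document}" p.2 then (be.1, p.1)
      else be) (0, 0)
    = (pvLastIdx (fun s => PySem.Str.isIn "maketitle" s) l.reverse,
       pvLastIdx (fun s => PySem.Str.isIn "end{document}" s && !PySem.Str.isIn "maketitle" s) l.reverse) := by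
  induction l using List.reverseRecOn with
  | nil => rfl
  | append_singleton l x ih =>
    rcases x with ⟨i, s⟩
    simp only [List.foldl_append, List.foldl_cons, List.foldl_nil, ih,
      List.reverse_append, List.reverse_cons, List.reverse_nil, List.nil_append,
      List.cons_append, pvLastIdx]
    by_cases hm : PySem.Str.isIn "maketitle" s <;>
      by_cases he : PySem.Str.isIn "end{document}" s <;>
      simp_all

-- pvLastIdx returns 0 or one of the list's indices
theorem pvLastIdx_nonneg (p : String → Bool) (l : List (Int × String))
    (h : ∀ x ∈ l, 0 ≤ x.1) : 0 ≤ pvLastIdx p l := by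
  induction l with
  | nil => simp [pvLastIdx]
  | cons a rest ih =>
    rcases a with ⟨i, s⟩
    simp only [pvLastIdx]
    split
    · exact h (i, s) (by simp)
    · exact ih (fun x hx => h x (by simp [hx]))

theorem pvLastIdx_le (p : String → Bool) (l : List (Int × String)) (i : Int)
    (h : ∀ x ∈ l, x.1 ≤ i) (hi : 0 ≤ i) : pvLastIdx p l ≤ i := by
  induction l with
  | nil => simpa [pvLastIdx]
  | cons a rest ih =>
    rcases a with ⟨j, s⟩
    simp only [pvLastIdx]
    split
    · exact h (j, s) (by simp)
    · exact ih (fun x hx => h x (by simp [hx]))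

-- either the elif-restricted end index equals the plain one, or the plain one is
-- dominated by the maketitle index (so both slices below come out empty)
theorem lastIdx_cases (E M : String → Bool) (l : List (Int × String))
    (hpos : ∀ x ∈ l, 0 ≤ x.1)
    (hdesc : l.Pairwise (fun a b => b.1 < a.1)) :
    pvLastIdx (fun s => E s && !M s) l = pvLastIdx E l ∨
      (pvLastIdx E l ≤ pvLastIdx M l ∧
       pvLastIdx (fun s => E s && !M s) l ≤ pvLastIdx M l) := by
  induction l with
  | nil => left; rfl
  | cons a rest ih =>
    rcases a with ⟨i, s⟩
    have hi : 0 ≤ i := hpos (i, s) (by simp)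
    have hrest : ∀ x ∈ rest, x.1 ≤ i := by
      intro x hx
      exact le_of_lt ((List.pairwise_cons.mp hdesc).1 x hx)
    have hposr : ∀ x ∈ rest, 0 ≤ x.1 := fun x hx => hpos x (by simp [hx])
    have hdescr := (List.pairwise_cons.mp hdesc).2
    simp only [pvLastIdx]
    by_cases hE : E s
    · by_cases hM : M s
      · -- the line has both markers: M's index is i, E's index is i
        right
        simp only [hE, hM, Bool.not_true, Bool.and_false, if_true]
        exact ⟨le_refl i, pvLastIdx_le _ rest i hrest hi⟩
      · left; simp [hE, hM]
    · by_cases hM : M s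
      · -- no end marker here, but a maketitle: it dominates everything in rest
        right
        simp only [hE, Bool.false_and, hM, if_true]
        exact ⟨pvLastIdx_le _ rest i hrest hi, pvLastIdx_le _ rest i hrest hi⟩
      · simpa [hE, hM] using ih hposr hdescr

theorem noPreamble_spec : Claim_equal_noPreamble := by
  intro liste _
  show noPreamble liste = noPreamble_alt liste
  have key : (PySem.List.enumerate liste 0).foldl
      (fun (be : Int × Int) (p : Int × String) =>
        if PySem.Str.isIn "maketitle" p.2 then (p.1, be.2)
        else if PySem.Str.isIn "end{document}" p.2 then (be.1, p.1)
        else be) (0, 0)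
      = (PySem.List.pyRange 0 (liste.length : Int) 1).foldl
      (fun (be : Int × Int) i =>
        if PySem.Str.isIn "maketitle" (PySem.List.pyGetD liste i "") then (i, be.2)
        else if PySem.Str.isIn "end{document}" (PySem.List.pyGetD liste i "") then (be.1, i)
        else be) (0, 0) := by
    rw [show ((liste.length : Int)) = PySem.List.len liste from rfl,
      PySem.List.enumerate_eq_map_pyRange liste "", List.foldl_map]
  unfold noPreamble noPreamble_alt
  rw [← key, fold_eq_lastIdx]
  set l := (PySem.List.enumerate liste 0).reverse with hl
  show PySem.List.slice liste
      (some (pvLastIdx (fun s => PySem.Str.isIn "maketitle" s) l + 1))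
      (some (pvLastIdx (fun s => PySem.Str.isIn "end{document}" s && !PySem.Str.isIn "maketitle" s) l))
    = PySem.List.slice liste
      (some (pvLastIdx (fun s => PySem.Str.isIn "maketitle" s) l + 1))
      (some (pvLastIdx (fun s => PySem.Str.isIn "end{document}" s) l))
  have hpos : ∀ x ∈ l, 0 ≤ x.1 := by
    intro x hx
    rw [hl, List.mem_reverse] at hx
    obtain ⟨k, hk, rfl⟩ := (PySem.List.mem_enumerate_iff liste 0 x).mp hx
    simp
  have hdesc : l.Pairwise (fun a b => b.1 < a.1) := by
    rw [hl, List.pairwise_reverse]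
    exact PySem.List.pairwise_lt_enumerate liste 0
  rcases lastIdx_cases (fun s => PySem.Str.isIn "end{document}" s)
      (fun s => PySem.Str.isIn "maketitle" s) l hpos hdesc with h | ⟨h1, h2⟩
  · rw [h]
  · -- both end bounds lie at or below beg, so both slices are empty
    have hm : 0 ≤ pvLastIdx (fun s => PySem.Str.isIn "maketitle" s) l :=
      pvLastIdx_nonneg _ l hpos
    have he : 0 ≤ pvLastIdx (fun s => PySem.Str.isIn "end{document}" s) l :=
      pvLastIdx_nonneg _ l hpos
    have hen : 0 ≤ pvLastIdx
        (fun s => PySem.Str.isIn "end{document}" s && !PySem.Str.isIn "maketitle" s) l :=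
      pvLastIdx_nonneg _ l hpos
    rw [PySem.List.slice_toNat liste (by omega) hen,
        PySem.List.slice_toNat liste (by omega) he]
    have t1 : (pvLastIdx
        (fun s => PySem.Str.isIn "end{document}" s && !PySem.Str.isIn "maketitle" s) l).toNat
        - (pvLastIdx (fun s => PySem.Str.isIn "maketitle" s) l + 1).toNat = 0 := by omega
    have t2 : (pvLastIdx (fun s => PySem.Str.isIn "end{document}" s) l).toNat
        - (pvLastIdx (fun s => PySem.Str.isIn "maketitle" s) l + 1).toNat = 0 := by omega
    rw [t1, t2]
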